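-- pv_equiv track=rewrite | github.com/pgZhx/Course_work | 人工智能/A_star算法解15puzzle/Code/15puzzle5.py | calculate_h3
-- ===== SOURCE A (Python) =====
-- def calculate_h3(matrix):# 启发式函数3：结合线性冲突的曼哈顿距离
--         distance = 0
--         linear_conflict = 0
--         for i in range(4):
--             for j in range(4):
--                 if matrix[i][j] != 0:
--                     target_row = (matrix[i][j] - 1) // 4
--                     target_col = (matrix[i][j] - 1) % 4
--                     distance += abs(i - target_row) + abs(j - target_col)
--                     if i == target_row:  # 在同一行
--                         for k in range(j + 1, 4):
--                             if matrix[i][k] != 0 and (matrix[i][k] - 1) // 4 == target_row and matrix[i][j] > matrix[i][k]: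
--                                 linear_conflict += 1
--                     if j == target_col:  # 在同一列
--                         for k in range(i + 1, 4):
--                             if matrix[k][j] != 0 and (matrix[k][j] - 1) % 4 == target_col and matrix[i][j] > matrix[k][j]:
--                                 linear_conflict += 1
--         return distance + 2 * linear_conflict
-- ===== SOURCE B (Python) =====
-- def _inversions(xs):
--     # number of pairs (a before b) with a > b
--     if not xs:
--         return 0
--     return sum(1 for b in xs[1:] if xs[0] > b) + _inversions(xs[1:])
--
--
-- def calculate_h3(matrix):
--     # Manhattan distance in one plain pass
--     distance = 0
--     for i in range(4):
--         for j in range(4):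
--             v = matrix[i][j]
--             if v != 0:
--                 distance += abs(i - (v - 1) // 4) + abs(j - (v - 1) % 4)
--     # linear conflicts = inversions among the tiles already in their home row/column
--     conflict = 0
--     for i in range(4):
--         conflict += _inversions([matrix[i][j] for j in range(4)
--                                  if matrix[i][j] != 0 and (matrix[i][j] - 1) // 4 == i])
--     for j in range(4):
--         conflict += _inversions([matrix[i][j] for i in range(4)
--                                  if matrix[i][j] != 0 and (matrix[i][j] - 1) % 4 == j])
--     return distance + 2 * conflict
-- ===== Notes on version B (the rewrite author's own statement) =====
-- stated objective: alternative
-- what changed: Instead of nested per-cell suffix scans interleaved with the distance loop, B computes the Manhattan distance in one plain pass and obtains the linear-conflict term separately as the inversion count of the home-row/home-column tiles collected per row and per column.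
import Mathlib
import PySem

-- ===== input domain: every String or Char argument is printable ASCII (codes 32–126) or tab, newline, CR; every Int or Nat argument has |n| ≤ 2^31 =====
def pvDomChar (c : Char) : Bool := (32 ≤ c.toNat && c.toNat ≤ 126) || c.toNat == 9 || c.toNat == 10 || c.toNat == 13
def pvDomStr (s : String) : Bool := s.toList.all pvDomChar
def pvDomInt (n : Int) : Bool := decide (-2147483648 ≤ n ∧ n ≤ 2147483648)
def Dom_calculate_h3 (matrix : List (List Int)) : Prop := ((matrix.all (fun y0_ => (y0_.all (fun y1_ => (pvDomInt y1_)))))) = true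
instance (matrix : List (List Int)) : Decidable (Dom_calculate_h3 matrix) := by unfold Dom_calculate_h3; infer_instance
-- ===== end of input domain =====

-- B changes the decomposition (separate distance pass + per-row/column inversion counting of
-- home tiles) instead of A's per-cell suffix scans; equal return value on Pre_ (where A returns).

-- matrix[i][j]; exact under Pre_ (both indices in range); shared indexing helper of both ports
def mget (m : List (List Int)) (i j : Int) : Int :=
  PySem.List.pyGetD (PySem.List.pyGetD m i []) j 0

-- ===== PORT A =====
-- inner 'for k in range(j+1, 4)' over the row suffix
def aConfRow (m : List (List Int)) (i j tr v lc : Int) : Int :=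
  (PySem.List.pyRange (j + 1) 4 1).foldl
    (fun acc k =>
      if mget m i k ≠ 0 ∧ PySem.Int.floordiv (mget m i k - 1) 4 = tr ∧ v > mget m i k
      then acc + 1 else acc) lc

-- inner 'for k in range(i+1, 4)' over the column suffix
def aConfCol (m : List (List Int)) (i j tc v lc : Int) : Int :=
  (PySem.List.pyRange (i + 1) 4 1).foldl
    (fun acc k =>
      if mget m k j ≠ 0 ∧ PySem.Int.mod (mget m k j - 1) 4 = tc ∧ v > mget m k j
      then acc + 1 else acc) lc

-- body of the two nested loops: state = (distance, linear_conflict)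
def aCell (m : List (List Int)) (s : Int × Int) (i j : Int) : Int × Int :=
  let v := mget m i j
  if v ≠ 0 then
    let tr := PySem.Int.floordiv (v - 1) 4
    let tc := PySem.Int.mod (v - 1) 4
    let s1 : Int × Int := (s.1 + |i - tr| + |j - tc|, s.2)
    let s2 : Int × Int := if i = tr then (s1.1, aConfRow m i j tr v s1.2) else s1
    if j = tc then (s2.1, aConfCol m i j tc v s2.2) else s2
  else s

def calculate_h3 (matrix : List (List Int)) : Int :=
  let st := (PySem.List.pyRange 0 4 1).foldl
    (fun s i => (PySem.List.pyRange 0 4 1).foldl (fun s j => aCell matrix s i j) s) (0, 0)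
  st.1 + 2 * st.2

-- ===== PORT B =====
-- recursive _inversions
def inv : List Int → Int
  | [] => 0
  | a :: rest => ((rest.countP (fun b => decide (a > b)) : Nat) : Int) + inv rest

-- [matrix[i][j] for j in range(4) if matrix[i][j] != 0 and (matrix[i][j]-1)//4 == i]
def rowList (m : List (List Int)) (i : Int) : List Int :=
  ((PySem.List.pyRange 0 4 1).map (fun j => mget m i j)).filter
    (fun v => decide (v ≠ 0 ∧ PySem.Int.floordiv (v - 1) 4 = i))

def colList (m : List (List Int)) (j : Int) : List Int :=
  ((PySem.List.pyRange 0 4 1).map (fun i => mget m i j)).filter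
    (fun v => decide (v ≠ 0 ∧ PySem.Int.mod (v - 1) 4 = j))

def calculate_h3_alt (matrix : List (List Int)) : Int :=
  let distance := (PySem.List.pyRange 0 4 1).foldl
    (fun d i => (PySem.List.pyRange 0 4 1).foldl
      (fun d j =>
        let v := mget matrix i j
        if v ≠ 0 then
          d + (|i - PySem.Int.floordiv (v - 1) 4| + |j - PySem.Int.mod (v - 1) 4|)
        else d) d) 0
  let conflict := (PySem.List.pyRange 0 4 1).foldl
    (fun c j => c + inv (colList matrix j))
    ((PySem.List.pyRange 0 4 1).foldl (fun c i => c + inv (rowList matrix i)) 0)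
  distance + 2 * conflict

-- ===== PRECONDITION & SPEC =====
-- Pre_ excludes exactly the inputs where Python A raises IndexError: fewer than 4 rows,
-- or one of the first 4 rows shorter than 4.
def Pre_calculate_h3 (matrix : List (List Int)) : Prop :=
  4 ≤ matrix.length ∧ ∀ r ∈ matrix.take 4, 4 ≤ r.length
instance (matrix : List (List Int)) : Decidable (Pre_calculate_h3 matrix) := by
  unfold Pre_calculate_h3; infer_instance

def pvWitness_calculate_h3 : List (List Int) :=
  [[1, 2, 3, 4], [5, 6, 7, 8], [9, 10, 11, 12], [13, 15, 14, 0]]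

def Spec_calculate_h3 (matrix : List (List Int)) (out : Int) : Prop := out = calculate_h3_alt matrix
instance (matrix : List (List Int)) (out : Int) : Decidable (Spec_calculate_h3 matrix out) := by
  unfold Spec_calculate_h3; infer_instance

-- ===== CLAIM (what is proved, stated in full; the proofs are below) =====
def Claim_equal_calculate_h3 : Prop := ∀ (matrix : List (List Int)), Dom_calculate_h3 matrix → Pre_calculate_h3 matrix → Spec_calculate_h3 matrix (calculate_h3 matrix)

-- ===== LEMMAS AND PROOFS =====

theorem pyR04 : PySem.List.pyRange 0 4 1 = [0, 1, 2, 3] := by decide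
theorem pyR14 : PySem.List.pyRange (0 + 1) 4 1 = [1, 2, 3] := by decide
theorem pyR24 : PySem.List.pyRange (1 + 1) 4 1 = [2, 3] := by decide
theorem pyR34 : PySem.List.pyRange (2 + 1) 4 1 = [3] := by decide
theorem pyR44 : PySem.List.pyRange (3 + 1) 4 1 = [] := by decide

-- per-cell closed forms of A's loop body
def dcell (m : List (List Int)) (i j : Int) : Int :=
  if mget m i j ≠ 0 then
    |i - PySem.Int.floordiv (mget m i j - 1) 4| + |j - PySem.Int.mod (mget m i j - 1) 4|
  else 0

def rpart (m : List (List Int)) (i j : Int) : Int :=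
  if mget m i j ≠ 0 ∧ i = PySem.Int.floordiv (mget m i j - 1) 4 then
    (((PySem.List.pyRange (j + 1) 4 1).countP (fun k => decide (mget m i k ≠ 0 ∧
        PySem.Int.floordiv (mget m i k - 1) 4 = PySem.Int.floordiv (mget m i j - 1) 4 ∧
        mget m i j > mget m i k)) : Nat) : Int)
  else 0

def cpart (m : List (List Int)) (i j : Int) : Int :=
  if mget m i j ≠ 0 ∧ j = PySem.Int.mod (mget m i j - 1) 4 then
    (((PySem.List.pyRange (i + 1) 4 1).countP (fun k => decide (mget m k j ≠ 0 ∧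
        PySem.Int.mod (mget m k j - 1) 4 = PySem.Int.mod (mget m i j - 1) 4 ∧
        mget m i j > mget m k j)) : Nat) : Int)
  else 0

theorem aCell_closed (m : List (List Int)) (s : Int × Int) (i j : Int) :
    aCell m s i j = (s.1 + dcell m i j, s.2 + (rpart m i j + cpart m i j)) := by
  simp only [aCell, aConfRow, aConfCol, dcell, rpart, cpart, PySem.List.foldl_ite_add_one]
  split_ifs <;>
    first
      | tauto
      | (refine Prod.ext ?_ ?_ <;> dsimp only <;> ring)

theorem A_closed (m : List (List Int)) :
    calculate_h3 m =
      (dcell m 0 0 + dcell m 0 1 + dcell m 0 2 + dcell m 0 3 +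
       dcell m 1 0 + dcell m 1 1 + dcell m 1 2 + dcell m 1 3 +
       dcell m 2 0 + dcell m 2 1 + dcell m 2 2 + dcell m 2 3 +
       dcell m 3 0 + dcell m 3 1 + dcell m 3 2 + dcell m 3 3) +
      2 * (rpart m 0 0 + rpart m 0 1 + rpart m 0 2 + rpart m 0 3 +
           rpart m 1 0 + rpart m 1 1 + rpart m 1 2 + rpart m 1 3 +
           rpart m 2 0 + rpart m 2 1 + rpart m 2 2 + rpart m 2 3 +
           rpart m 3 0 + rpart m 3 1 + rpart m 3 2 + rpart m 3 3 +
           cpart m 0 0 + cpart m 0 1 + cpart m 0 2 + cpart m 0 3 +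
           cpart m 1 0 + cpart m 1 1 + cpart m 1 2 + cpart m 1 3 +
           cpart m 2 0 + cpart m 2 1 + cpart m 2 2 + cpart m 2 3 +
           cpart m 3 0 + cpart m 3 1 + cpart m 3 2 + cpart m 3 3) := by
  simp only [calculate_h3, pyR04, List.foldl, aCell_closed]
  ring

theorem bstep (m : List (List Int)) (i j d : Int) :
    (if mget m i j ≠ 0 then
       d + (|i - PySem.Int.floordiv (mget m i j - 1) 4| + |j - PySem.Int.mod (mget m i j - 1) 4|)
     else d) = d + dcell m i j := by
  unfold dcell; split_ifs <;> ring

theorem B_closed (m : List (List Int)) :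
    calculate_h3_alt m =
      (dcell m 0 0 + dcell m 0 1 + dcell m 0 2 + dcell m 0 3 +
       dcell m 1 0 + dcell m 1 1 + dcell m 1 2 + dcell m 1 3 +
       dcell m 2 0 + dcell m 2 1 + dcell m 2 2 + dcell m 2 3 +
       dcell m 3 0 + dcell m 3 1 + dcell m 3 2 + dcell m 3 3) +
      2 * (inv (rowList m 0) + inv (rowList m 1) + inv (rowList m 2) + inv (rowList m 3) +
           inv (colList m 0) + inv (colList m 1) + inv (colList m 2) + inv (colList m 3)) := by
  simp only [calculate_h3_alt, pyR04, List.foldl, bstep]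
  ring

theorem inv_filter_cons (p : Int → Bool) (x : Int) (xs : List Int) :
    inv ((x :: xs).filter p) =
      (if p x then ((xs.countP (fun y => decide (x > y) && p y) : Nat) : Int) else 0) +
        inv (xs.filter p) := by
  cases hp : p x
  · simp [hp]
  · simp [hp, inv, List.countP_filter]

theorem cellBridgeRow (m : List (List Int)) (i v : Int) (ks : List Int) :
    (if v ≠ 0 ∧ i = PySem.Int.floordiv (v - 1) 4 then
       ((ks.countP (fun k => decide (mget m i k ≠ 0 ∧
           PySem.Int.floordiv (mget m i k - 1) 4 = PySem.Int.floordiv (v - 1) 4 ∧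
           v > mget m i k)) : Nat) : Int)
     else 0)
    = (if (decide (v ≠ 0 ∧ PySem.Int.floordiv (v - 1) 4 = i)) = true then
         (((ks.map (fun k => mget m i k)).countP
            (fun y => decide (v > y) && decide (y ≠ 0 ∧ PySem.Int.floordiv (y - 1) 4 = i)) : Nat) : Int)
       else 0) := by
  by_cases h0 : v = 0
  · simp [h0]
  by_cases h1 : i = PySem.Int.floordiv (v - 1) 4
  · rw [if_pos ⟨h0, h1⟩, if_pos (by simp only [decide_eq_true_eq]; exact ⟨h0, h1.symm⟩)]
    rw [List.countP_map]
    norm_cast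
    apply List.countP_congr
    intro k _
    simp only [Function.comp]
    rw [← h1]
    by_cases a1 : mget m i k = 0 <;> by_cases a2 : PySem.Int.floordiv (mget m i k - 1) 4 = i <;>
      by_cases a3 : v > mget m i k <;> simp [a1, a3]
  · rw [if_neg (by tauto),
      if_neg (by simp only [decide_eq_true_eq]; rintro ⟨-, h⟩; exact h1 h.symm)]

theorem cellBridgeCol (m : List (List Int)) (j v : Int) (ks : List Int) :
    (if v ≠ 0 ∧ j = PySem.Int.mod (v - 1) 4 then
       ((ks.countP (fun k => decide (mget m k j ≠ 0 ∧
           PySem.Int.mod (mget m k j - 1) 4 = PySem.Int.mod (v - 1) 4 ∧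
           v > mget m k j)) : Nat) : Int)
     else 0)
    = (if (decide (v ≠ 0 ∧ PySem.Int.mod (v - 1) 4 = j)) = true then
         (((ks.map (fun k => mget m k j)).countP
            (fun y => decide (v > y) && decide (y ≠ 0 ∧ PySem.Int.mod (y - 1) 4 = j)) : Nat) : Int)
       else 0) := by
  by_cases h0 : v = 0
  · simp [h0]
  by_cases h1 : j = PySem.Int.mod (v - 1) 4
  · rw [if_pos ⟨h0, h1⟩, if_pos (by simp only [decide_eq_true_eq]; exact ⟨h0, h1.symm⟩)]
    rw [List.countP_map]
    norm_cast
    apply List.countP_congr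
    intro k _
    simp only [Function.comp]
    rw [← h1]
    by_cases a1 : mget m k j = 0 <;> by_cases a2 : PySem.Int.mod (mget m k j - 1) 4 = j <;>
      by_cases a3 : v > mget m k j <;> simp [a1, a3]
  · rw [if_neg (by tauto),
      if_neg (by simp only [decide_eq_true_eq]; rintro ⟨-, h⟩; exact h1 h.symm)]

theorem rowBridge (m : List (List Int)) (i : Int) :
    rpart m i 0 + rpart m i 1 + rpart m i 2 + rpart m i 3 = inv (rowList m i) := by
  have e : rowList m i =
      [mget m i 0, mget m i 1, mget m i 2, mget m i 3].filter
        (fun v => decide (v ≠ 0 ∧ PySem.Int.floordiv (v - 1) 4 = i)) := by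
    simp [rowList, pyR04]
  rw [e, inv_filter_cons, inv_filter_cons, inv_filter_cons, inv_filter_cons]
  simp only [rpart, pyR14, pyR24, pyR34, pyR44,
    cellBridgeRow m i (mget m i 0) [1, 2, 3],
    cellBridgeRow m i (mget m i 1) [2, 3],
    cellBridgeRow m i (mget m i 2) [3],
    cellBridgeRow m i (mget m i 3) []]
  simp [inv]
  ring

theorem colBridge (m : List (List Int)) (j : Int) :
    cpart m 0 j + cpart m 1 j + cpart m 2 j + cpart m 3 j = inv (colList m j) := by
  have e : colList m j =
      [mget m 0 j, mget m 1 j, mget m 2 j, mget m 3 j].filter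
        (fun v => decide (v ≠ 0 ∧ PySem.Int.mod (v - 1) 4 = j)) := by
    simp [colList, pyR04]
  rw [e, inv_filter_cons, inv_filter_cons, inv_filter_cons, inv_filter_cons]
  simp only [cpart, pyR14, pyR24, pyR34, pyR44,
    cellBridgeCol m j (mget m 0 j) [1, 2, 3],
    cellBridgeCol m j (mget m 1 j) [2, 3],
    cellBridgeCol m j (mget m 2 j) [3],
    cellBridgeCol m j (mget m 3 j) []]
  simp [inv]
  ring

-- ===== VERDICT (by name: the statement is the Claim_ definition above) =====
theorem calculate_h3_spec : Claim_equal_calculate_h3 := by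
  intro m _ _
  unfold Spec_calculate_h3
  rw [A_closed, B_closed,
    ← rowBridge m 0, ← rowBridge m 1, ← rowBridge m 2, ← rowBridge m 3,
    ← colBridge m 0, ← colBridge m 1, ← colBridge m 2, ← colBridge m 3]
  ring
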